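-- pv_equiv track=rewrite | github.com/segnig/CodeForces | C_Limited_Repainting.py | solve
-- ===== SOURCE A (Python) =====
-- def solve(nums, word, k, threshold):
--     count, tag = 0, False
--     for i in range(len(word)):
--         if word[i] == "B" and nums[i] > threshold:
--             if not tag:
--                 count += 1
--                 tag = True
--         if word[i] == "R" and nums[i] > threshold:
--             tag = False
--     return count <= k
-- ===== SOURCE B (Python) =====
-- def solve(nums, word, k, threshold):
--     sig = [word[i] for i in range(len(word))
--            if word[i] in ('B', 'R') and nums[i] > threshold]
--     runs = sum(1 for prev, cur in zip(['R'] + sig, sig)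
--                if cur == 'B' and prev != 'B')
--     return runs <= k
-- ===== Notes on version B (the rewrite author's own statement) =====
-- stated objective: idiomatic
-- what changed: Replaces the stateful rising-edge flag scan with a two-phase filter-then-count: first extract the significant B/R letters above threshold, then count B-runs by pairing the filtered sequence with its shifted self.
import Mathlib
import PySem

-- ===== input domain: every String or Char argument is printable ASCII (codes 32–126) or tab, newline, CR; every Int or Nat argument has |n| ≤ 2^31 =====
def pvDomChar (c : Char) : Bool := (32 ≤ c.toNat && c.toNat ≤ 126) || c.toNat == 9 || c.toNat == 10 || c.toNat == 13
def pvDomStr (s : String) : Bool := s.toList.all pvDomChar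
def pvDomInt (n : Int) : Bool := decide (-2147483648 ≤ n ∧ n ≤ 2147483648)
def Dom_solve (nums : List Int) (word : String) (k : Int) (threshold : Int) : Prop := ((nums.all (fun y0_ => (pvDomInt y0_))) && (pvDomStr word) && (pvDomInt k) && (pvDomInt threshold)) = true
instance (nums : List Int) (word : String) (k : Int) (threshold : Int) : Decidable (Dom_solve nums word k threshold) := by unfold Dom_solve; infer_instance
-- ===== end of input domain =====

-- B replaces A's stateful rising-edge flag scan by a filter-then-count decomposition
-- (extract significant B/R letters, then count B-runs via a shifted-pair scan); objective: idiomatic.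

-- ===== PORT A =====
-- nums[i] > threshold, with out-of-range giving false (Python raises there; excluded by Pre_solve)
def pvHot (nums : List Int) (threshold : Int) (i : Nat) : Bool :=
  match PySem.List.pyGet? nums (i : Int) with
  | some v => decide (threshold < v)
  | none => false

-- one iteration of A's for-loop: two independent ifs updating (count, tag)
def pvStepA (nums : List Int) (threshold : Int) (cs : List Char) (s : Int × Bool) (i : Nat) : Int × Bool :=
  let c := cs.getD i ' '
  let s1 := if c == 'B' && pvHot nums threshold i then (if !s.2 then (s.1 + 1, true) else s) else s
  if c == 'R' && pvHot nums threshold i then (s1.1, false) else s1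

def solve (nums : List Int) (word : String) (k : Int) (threshold : Int) : Bool :=
  let cs := word.toList
  let st := (List.range cs.length).foldl (pvStepA nums threshold cs) (0, false)
  decide (st.1 ≤ k)

-- ===== PORT B =====
-- the comprehension's body: keep word[i] when it is 'B' or 'R' and nums[i] > threshold
def pvSig (nums : List Int) (threshold : Int) (cs : List Char) (i : Nat) : Option Char :=
  let c := cs.getD i ' '
  if (c == 'B' || c == 'R') && pvHot nums threshold i then some c else none

def solve_alt (nums : List Int) (word : String) (k : Int) (threshold : Int) : Bool :=
  let cs := word.toList
  let sig := (List.range cs.length).filterMap (pvSig nums threshold cs)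
  let runs : Nat := (List.zip ('R' :: sig) sig).countP (fun p => p.2 == 'B' && p.1 != 'B')
  decide ((runs : Int) ≤ k)

-- ===== PRECONDITION & SPEC =====
-- Pre_solve excludes exactly the inputs where Python A raises IndexError: an index i with
-- word[i] ∈ {'B','R'} but i ≥ len(nums) (Python B raises there too).
def Pre_solve (nums : List Int) (word : String) (k : Int) (threshold : Int) : Prop :=
  ∀ i, i < word.toList.length →
    (word.toList.getD i ' ' = 'B' ∨ word.toList.getD i ' ' = 'R') → i < nums.length
instance (nums : List Int) (word : String) (k : Int) (threshold : Int) : Decidable (Pre_solve nums word k threshold) := by unfold Pre_solve; infer_instance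

def pvWitness_solve : List Int × String × Int × Int := ([1, -1, 2], "BxR", 1, 0)

def Spec_solve (nums : List Int) (word : String) (k : Int) (threshold : Int) (out : Bool) : Prop := out = solve_alt nums word k threshold
instance (nums : List Int) (word : String) (k : Int) (threshold : Int) (out : Bool) : Decidable (Spec_solve nums word k threshold out) := by unfold Spec_solve; infer_instance

-- ===== CLAIM (what is proved, stated in full; the proofs are below) =====
def Claim_equal_solve : Prop := ∀ (nums : List Int) (word : String) (k : Int) (threshold : Int), Dom_solve nums word k threshold → Pre_solve nums word k threshold → Spec_solve nums word k threshold (solve nums word k threshold)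

-- ===== LEMMAS AND PROOFS =====

-- A's loop body, expressed on the significant letter (if any) of position i
def pvFA (s : Int × Bool) (c : Char) : Int × Bool :=
  if c == 'B' then (if !s.2 then (s.1 + 1, true) else s) else (s.1, false)

theorem pvStepA_eq (nums : List Int) (threshold : Int) (cs : List Char) (s : Int × Bool) (i : Nat) :
    pvStepA nums threshold cs s i = (pvSig nums threshold cs i).elim s (pvFA s) := by
  unfold pvStepA pvSig pvFA
  by_cases hB : cs.getD i ' ' = 'B' <;> by_cases hR : cs.getD i ' ' = 'R' <;>
    simp [hB, hR] at * <;> cases h : pvHot nums threshold i <;> simp [hB, hR, h]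

theorem pvFold_filter (nums : List Int) (threshold : Int) (cs : List Char)
    (l : List Nat) (s : Int × Bool) :
    l.foldl (pvStepA nums threshold cs) s
      = (l.filterMap (pvSig nums threshold cs)).foldl pvFA s := by
  induction l generalizing s with
  | nil => rfl
  | cons i t ih =>
      simp only [List.foldl_cons, List.filterMap_cons]
      rw [pvStepA_eq]
      cases h : pvSig nums threshold cs i <;> simp [ih]

-- number of maximal 'B'-runs in sig, given the (virtual) previous letter
def pvRuns (prev : Char) (sig : List Char) : Nat :=
  match sig with
  | [] => 0
  | c :: r => (if c == 'B' && prev != 'B' then 1 else 0) + pvRuns c r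

theorem pvZip_count (prev : Char) (sig : List Char) :
    ((prev :: sig).zip sig).countP (fun p => p.2 == 'B' && p.1 != 'B') = pvRuns prev sig := by
  induction sig generalizing prev with
  | nil => rfl
  | cons c r ih =>
      simp only [List.zip_cons_cons, List.countP_cons, pvRuns, ih]
      omega

theorem pvFold_fst (sig : List Char) (n : Int) (prev : Char) :
    (sig.foldl pvFA (n, prev == 'B')).1 = n + (pvRuns prev sig : Nat) := by
  induction sig generalizing n prev with
  | nil => simp [pvRuns]
  | cons c r ih =>
      simp only [List.foldl_cons, pvRuns]
      by_cases hB : c = 'B'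
      · subst hB
        by_cases hp : prev = 'B'
        · have : pvFA (n, ('B' == 'B')) 'B' = (n, ('B' == 'B')) := by simp [pvFA]
          rw [hp, this, ih n 'B']; simp [hp]
        · have hpb : (prev == 'B') = false := by simp [hp]
          have : pvFA (n, prev == 'B') 'B' = (n + 1, ('B' == 'B')) := by simp [pvFA, hpb]
          rw [this, ih (n + 1) 'B']
          simp [hp]; push_cast; ring
      · have hcb : (c == 'B') = false := by simp [hB]
        have : pvFA (n, prev == 'B') c = (n, (c == 'B')) := by simp [pvFA, hcb]
        rw [this, ih n c]
        simp [hcb]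
-- ===== VERDICT (by name: the statement is the Claim_ definition above) =====
theorem solve_spec : Claim_equal_solve := by
  intro nums word k threshold _ _
  unfold Spec_solve solve solve_alt
  dsimp only
  rw [pvFold_filter]
  have h0 : (0, false) = ((0 : Int), ('R' == 'B')) := by simp
  rw [h0, pvFold_fst, pvZip_count]
  simp
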